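-- pv_equiv track=rewrite | github.com/IvascuVlad/InformationSecurity | KM.py | OFB_encrypting
-- ===== SOURCE A (Python) =====
-- def xor(first, second):
--     result = ''
--     for i in range(len(first)):
--         result += str(int(first[i]) ^ int(second[i]))
--     return result
--
-- def OFB_encrypting(initialization_vector, key, text):
--     number_of_iterations = len(text) // 128
--     previous = ""
--     ciphertext = ""
--     if len(text) % 128:
--         number_of_iterations += 1
--         while len(text) % 128 != 0:
--             text += "0"
--
--     for i in range(number_of_iterations):
--         if not i:
--             previous = xor(initialization_vector,key)
--             result = xor(previous, text[i*128 : (i+1)*128])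
--             ciphertext += result
--         else:
--             previous = xor(previous, key)
--             result = xor(previous, text[i * 128: (i + 1) * 128])
--             ciphertext += result
--     return ciphertext
-- ===== SOURCE B (Python) =====
-- def xor(first, second):
--     result = ''
--     for i in range(len(first)):
--         result += str(int(first[i]) ^ int(second[i]))
--     return result
--
-- def OFB_encrypting(initialization_vector, key, text):
--     # OFB keystream here has period 2: XORing with the key twice cancels,
--     # so block i uses xor(IV,key) for even i and xor(xor(IV,key),key) for odd i.
--     padded = text + "0" * (-len(text) % 128)
--     n = len(padded) // 128
--     if n == 0:
--         return ""
--     even = xor(initialization_vector, key)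
--     odd = xor(even, key)
--     return "".join(
--         xor(even if i % 2 == 0 else odd, padded[i * 128:(i + 1) * 128])
--         for i in range(n))
-- ===== Notes on version B (the rewrite author's own statement) =====
-- stated objective: alternative
-- what changed: B removes A's sequentially threaded `previous` keystream accumulator: since XORing with the key twice cancels on the binary domain, the keystream has period two blocks, so B precomputes even=xor(IV,key) and odd=xor(even,key) once and selects by block parity, joining the per-block XORs in one pass.
-- outside the precondition, e.g. on OFB_encrypting('92', '22', '5'): A returns '410', B raises IndexError; on OFB_encrypting('9', '9', '55'): A returns '5', B returns '5'
import Mathlib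
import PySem

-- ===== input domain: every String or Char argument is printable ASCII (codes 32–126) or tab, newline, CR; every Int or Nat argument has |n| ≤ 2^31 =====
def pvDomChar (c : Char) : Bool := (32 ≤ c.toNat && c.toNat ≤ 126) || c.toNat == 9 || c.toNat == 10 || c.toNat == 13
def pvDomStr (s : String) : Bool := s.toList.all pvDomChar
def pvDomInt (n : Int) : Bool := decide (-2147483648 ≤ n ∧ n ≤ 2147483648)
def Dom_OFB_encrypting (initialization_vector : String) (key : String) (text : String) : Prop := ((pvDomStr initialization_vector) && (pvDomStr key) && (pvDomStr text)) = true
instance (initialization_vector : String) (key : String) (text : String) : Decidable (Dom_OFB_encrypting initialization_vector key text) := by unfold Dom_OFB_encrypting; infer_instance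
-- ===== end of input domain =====

-- B replaces A's sequentially threaded `previous` keystream state by the period-two keystream
-- (XOR with the key twice cancels on the binary domain): a direct parity-indexed computation (objective: alternative).

-- ===== PORT A =====

-- int(c) for a digit character '0'..'9' (Pre_ admits only digits; elsewhere Python raises ValueError)
def pyDigitVal (c : Char) : Nat := c.toNat - 48

-- shared helper `xor` of both Source A and Source B, verbatim: for i in range(len(first)),
-- result += str(int(first[i]) ^ int(second[i])).  getD ' ' stands for second[i], always in range
-- under Pre_ (out of range Python raises IndexError).
def xorP (first second : List Char) : List Char :=
  (List.range first.length).foldl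
    (fun acc i =>
      acc ++ PySem.Int.toChars
        (((pyDigitVal (first.getD i ' ') ^^^ pyDigitVal (second.getD i ' ') : Nat) : Int))) []

def OFB_encrypting (initialization_vector : String) (key : String) (text : String) : String :=
  let t0 := text.toList
  let nit0 := t0.length / 128
  -- the `while` loop appends '0' until len % 128 == 0, i.e. exactly 128 - len % 128 zeros
  let p : Nat × List Char :=
    if t0.length % 128 ≠ 0 then (nit0 + 1, t0 ++ List.replicate (128 - t0.length % 128) '0')
    else (nit0, t0)
  let st := (List.range p.1).foldl
    (fun (st : List Char × List Char) i =>
      if i = 0 then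
        (xorP initialization_vector.toList key.toList,
         st.2 ++ xorP (xorP initialization_vector.toList key.toList)
                   ((p.2.drop (i * 128)).take 128))  -- text[i*128:(i+1)*128], nonneg in-range bounds
      else
        (xorP st.1 key.toList,
         st.2 ++ xorP (xorP st.1 key.toList) ((p.2.drop (i * 128)).take 128))) ([], [])
  String.ofList st.2

-- ===== PORT B =====
def OFB_encrypting_alt (initialization_vector : String) (key : String) (text : String) : String :=
  -- "0" * (-len(text) % 128) = (128 - len % 128) % 128 zeros (Python % floors, divisor's sign)
  let padded := text.toList ++ List.replicate ((128 - text.toList.length % 128) % 128) '0'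
  let n := padded.length / 128
  if n = 0 then ""
  else
    let evenB := xorP initialization_vector.toList key.toList
    let oddB := xorP evenB key.toList
    String.ofList (((List.range n).map
      (fun i => xorP (if i % 2 = 0 then evenB else oddB) ((padded.drop (i * 128)).take 128))).flatten)

-- ===== PRECONDITION & SPEC =====
-- Pre_ restricts to the natural domain of this cipher: binary IV and key (key at least as long as the IV,
-- IV at most one block) and digit text — or empty text (A returns "" without touching IV/key), or an
-- empty IV (every xor is then empty and both return "").  Outside it xor's digit arithmetic can emit
-- multi-digit tokens that desynchronise the stream: A raises, or returns an accidental value that B's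
-- precomputed odd keystream block cannot reproduce (B raises).
def Pre_OFB_encrypting (initialization_vector : String) (key : String) (text : String) : Prop :=
  text = "" ∨ initialization_vector = "" ∨
  (initialization_vector.toList.length ≤ 128 ∧
   initialization_vector.toList.length ≤ key.toList.length ∧
   (∀ c ∈ initialization_vector.toList, c = '0' ∨ c = '1') ∧
   (∀ c ∈ key.toList, c = '0' ∨ c = '1') ∧
   (∀ c ∈ text.toList, '0' ≤ c ∧ c ≤ '9'))
instance (initialization_vector : String) (key : String) (text : String) : Decidable (Pre_OFB_encrypting initialization_vector key text) := by unfold Pre_OFB_encrypting; infer_instance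

def pvWitness_OFB_encrypting : String × String × String := ("0", "1", "")

def Spec_OFB_encrypting (initialization_vector : String) (key : String) (text : String) (out : String) : Prop := out = OFB_encrypting_alt initialization_vector key text
instance (initialization_vector : String) (key : String) (text : String) (out : String) : Decidable (Spec_OFB_encrypting initialization_vector key text out) := by unfold Spec_OFB_encrypting; infer_instance

-- ===== CLAIM (what is proved, stated in full; the proofs are below) =====
def Claim_equal_OFB_encrypting : Prop := ∀ (initialization_vector : String) (key : String) (text : String), Dom_OFB_encrypting initialization_vector key text → Pre_OFB_encrypting initialization_vector key text → Spec_OFB_encrypting initialization_vector key text (OFB_encrypting initialization_vector key text)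

-- ===== LEMMAS AND PROOFS =====

-- digit value of the i-th char
def bitAt (x : List Char) (i : Nat) : Nat := pyDigitVal (x.getD i ' ')

def IsBits (x : List Char) : Prop := ∀ c ∈ x, c = '0' ∨ c = '1'

lemma xorP_flat (f s : List Char) :
    xorP f s = (List.range f.length).flatMap
      (fun i => PySem.Int.toChars (((bitAt f i ^^^ bitAt s i : Nat) : Int))) := by
  unfold xorP bitAt
  exact PySem.List.foldl_append_eq_flatMap _ _ _

lemma bitAt_le_one {x : List Char} (hx : IsBits x) {i : Nat} (hi : i < x.length) :
    bitAt x i ≤ 1 := by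
  have hc : x.getD i ' ' ∈ x := by
    rw [List.getD_eq_getElem _ _ hi]; exact List.getElem_mem hi
  rcases hx _ hc with h | h <;> simp only [bitAt, pyDigitVal, h] <;> decide

lemma toChars_single (b : Nat) (hb : b ≤ 9) :
    PySem.Int.toChars (b : Int) = [Char.ofNat (48 + b)] := by
  interval_cases b <;> decide

lemma pyDigitVal_ofNat (b : Nat) (hb : b ≤ 9) : pyDigitVal (Char.ofNat (48 + b)) = b := by
  interval_cases b <;> decide

lemma bitChar_eq {c : Char} (h : c = '0' ∨ c = '1') : Char.ofNat (48 + pyDigitVal c) = c := by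
  rcases h with h | h <;> subst h <;> decide

lemma xor_le_one {a b : Nat} (ha : a ≤ 1) (hb : b ≤ 1) : a ^^^ b ≤ 1 := by
  rcases Nat.le_one_iff_eq_zero_or_eq_one.mp ha with rfl | rfl <;>
    rcases Nat.le_one_iff_eq_zero_or_eq_one.mp hb with rfl | rfl <;> decide

lemma xorP_map_of_bits {x k : List Char} (hx : IsBits x) (hk : IsBits k)
    (hlen : x.length ≤ k.length) :
    xorP x k = (List.range x.length).map
      (fun i => Char.ofNat (48 + (bitAt x i ^^^ bitAt k i))) := by
  rw [xorP_flat]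
  have h : ∀ i ∈ List.range x.length,
      PySem.Int.toChars (((bitAt x i ^^^ bitAt k i : Nat) : Int)) =
        [Char.ofNat (48 + (bitAt x i ^^^ bitAt k i))] := by
    intro i hi
    simp only [List.mem_range] at hi
    exact toChars_single _ (le_trans
      (xor_le_one (bitAt_le_one hx hi) (bitAt_le_one hk (lt_of_lt_of_le hi hlen))) (by norm_num))
  have hsing : ∀ (l : List Nat) (f : Nat → Char), l.flatMap (fun i => [f i]) = l.map f := by
    intro l f
    induction l with
    | nil => rfl
    | cons a l ih => simp [ih]
  calc (List.range x.length).flatMap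
        (fun i => PySem.Int.toChars (((bitAt x i ^^^ bitAt k i : Nat) : Int)))
      = (List.range x.length).flatMap
          (fun i => [Char.ofNat (48 + (bitAt x i ^^^ bitAt k i))]) := by
        rw [List.flatMap_def, List.flatMap_def, List.map_congr_left h]
    _ = _ := hsing _ _

lemma length_xorP_of_bits {x k : List Char} (hx : IsBits x) (hk : IsBits k)
    (hlen : x.length ≤ k.length) : (xorP x k).length = x.length := by
  rw [xorP_map_of_bits hx hk hlen]; simp

lemma isBits_xorP {x k : List Char} (hx : IsBits x) (hk : IsBits k)
    (hlen : x.length ≤ k.length) : IsBits (xorP x k) := by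
  rw [xorP_map_of_bits hx hk hlen]
  intro c hc
  simp only [List.mem_map, List.mem_range] at hc
  obtain ⟨i, hi, rfl⟩ := hc
  rcases Nat.le_one_iff_eq_zero_or_eq_one.mp (bitAt_le_one hx hi) with h | h <;>
    rcases Nat.le_one_iff_eq_zero_or_eq_one.mp
      (bitAt_le_one hk (lt_of_lt_of_le hi hlen)) with h' | h' <;>
    rw [h, h'] <;> decide

lemma bitAt_xorP {x k : List Char} (hx : IsBits x) (hk : IsBits k)
    (hlen : x.length ≤ k.length) {i : Nat} (hi : i < x.length) :
    bitAt (xorP x k) i = bitAt x i ^^^ bitAt k i := by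
  conv_lhs => rw [xorP_map_of_bits hx hk hlen]
  unfold bitAt
  rw [List.getD_eq_getElem _ _ (by simpa using hi)]
  simp only [List.getElem_map, List.getElem_range]
  exact pyDigitVal_ofNat _ (le_trans
    (xor_le_one (bitAt_le_one hx hi) (bitAt_le_one hk (lt_of_lt_of_le hi hlen))) (by norm_num))

lemma xorP_involution {x k : List Char} (hx : IsBits x) (hk : IsBits k)
    (hlen : x.length ≤ k.length) : xorP (xorP x k) k = x := by
  have hb := isBits_xorP hx hk hlen
  have hl := length_xorP_of_bits hx hk hlen
  rw [xorP_map_of_bits hb hk (hl ▸ hlen), hl]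
  apply List.ext_getElem (by simp)
  intro i hi hix
  simp only [List.getElem_map, List.getElem_range]
  have hix' : i < x.length := by simpa using hix
  rw [bitAt_xorP hx hk hlen hix']
  rw [Nat.xor_assoc, Nat.xor_self, Nat.xor_zero]
  show Char.ofNat (48 + pyDigitVal (x.getD i ' ')) = x[i]
  rw [List.getD_eq_getElem _ _ hix']
  exact bitChar_eq (hx x[i] (List.getElem_mem _))

-- the keystream of block i: period two
def streamC (iv k : List Char) (i : Nat) : List Char :=
  if i % 2 = 0 then xorP iv k else xorP (xorP iv k) k

lemma stream_step {iv k : List Char} (hiv : IsBits iv) (hk : IsBits k)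
    (hlen : iv.length ≤ k.length) (i : Nat) :
    xorP (streamC iv k i) k = streamC iv k (i + 1) := by
  unfold streamC
  rcases Nat.mod_two_eq_zero_or_one i with h | h
  · rw [if_pos h, if_neg (by omega)]
  · have he : IsBits (xorP iv k) := isBits_xorP hiv hk hlen
    have hl := length_xorP_of_bits hiv hk hlen
    rw [if_neg (by omega), if_pos (by omega)]
    exact xorP_involution he hk (hl ▸ hlen)

lemma xorP_nil (s : List Char) : xorP [] s = [] := rfl

lemma loop_inv {iv k : List Char}
    (hstep : ∀ i, xorP (streamC iv k i) k = streamC iv k (i + 1)) (t : List Char) (n : Nat) :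
    (List.range n).foldl
      (fun (st : List Char × List Char) i =>
        if i = 0 then
          (xorP iv k, st.2 ++ xorP (xorP iv k) ((t.drop (i * 128)).take 128))
        else
          (xorP st.1 k, st.2 ++ xorP (xorP st.1 k) ((t.drop (i * 128)).take 128))) ([], []) =
    ((if n = 0 then [] else streamC iv k (n - 1)),
      ((List.range n).map
        (fun i => xorP (streamC iv k i) ((t.drop (i * 128)).take 128))).flatten) := by
  induction n with
  | zero => simp
  | succ m ih =>
    rw [List.range_succ, List.foldl_append, ih, List.map_append, List.flatten_append]
    cases m with
    | zero => simp [streamC]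
    | succ j =>
      simp only [List.foldl_cons, List.foldl_nil]
      rw [if_neg (by omega)]
      simp only [Nat.succ_sub_one]
      rw [if_neg (by omega), if_neg (by omega)]
      simp [hstep j]

-- both ports, on nonempty text, reduce to the same parity-indexed keystream once the
-- one-step keystream recurrence holds
lemma ports_eq_of_step (iv k text : String) (ht : ¬ text.toList = [])
    (hstep : ∀ i, xorP (streamC iv.toList k.toList i) k.toList = streamC iv.toList k.toList (i + 1)) :
    OFB_encrypting iv k text = OFB_encrypting_alt iv k text := by
  have hlpos : text.toList.length ≠ 0 := by
    simpa [List.length_eq_zero_iff] using ht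
  have hstream : ∀ i : Nat,
      (if i % 2 = 0 then xorP iv.toList k.toList
       else xorP (xorP iv.toList k.toList) k.toList) = streamC iv.toList k.toList i :=
    fun i => rfl
  unfold OFB_encrypting OFB_encrypting_alt
  by_cases hm : text.toList.length % 128 = 0
  · have e1 : (128 - 0) % 128 = 0 := by norm_num
    have hn : text.toList.length / 128 ≠ 0 := by omega
    simp only [hm, e1, ne_eq, not_true_eq_false, if_false, List.replicate_zero,
      List.append_nil, if_neg hn]
    rw [loop_inv hstep]
    simp only [hstream]
  · have e2 : (128 - text.toList.length % 128) % 128 = 128 - text.toList.length % 128 := by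
      omega
    have e3 : (text.toList.length + (128 - text.toList.length % 128)) / 128 =
        text.toList.length / 128 + 1 := by omega
    simp only [hm, e2, ne_eq, not_false_eq_true, if_true, List.length_append,
      List.length_replicate, e3, Nat.succ_ne_zero, if_false]
    rw [loop_inv hstep]
    simp only [hstream]

-- ===== VERDICT (by name: the statement is the Claim_ definition above) =====
theorem OFB_encrypting_spec : Claim_equal_OFB_encrypting := by
  intro iv k text _ hpre
  unfold Spec_OFB_encrypting
  by_cases ht : text.toList = []
  · unfold OFB_encrypting OFB_encrypting_alt
    simp [ht]
  · rcases hpre with h | h | ⟨h128, hlen, hiv, hk, _⟩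
    · rw [h] at ht; exact absurd rfl ht
    · have hiv0 : iv.toList = [] := by rw [h]; rfl
      refine ports_eq_of_step iv k text ht (fun i => ?_)
      unfold streamC
      rw [hiv0]
      simp [xorP_nil]
    · exact ports_eq_of_step iv k text ht (stream_step hiv hk hlen)
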